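-- pv_equiv track=rewrite | github.com/maelcr/m1-2024-introduction | exercices.py | DivisibleCheck
-- ===== SOURCE A (Python) =====
-- def DivisibleCheck(isDivisible=7, notDivisible=5, rangeMin=4000, rangeMax=5000):
--     i=rangeMin
--     liste_return=[]
--     while(i<rangeMax):
--         if ((i%isDivisible)==0 and (i%notDivisible)!=0):
--             liste_return.append(i)
--         i+=1
--     return liste_return
-- ===== SOURCE B (Python) =====
-- def DivisibleCheck(isDivisible=7, notDivisible=5, rangeMin=4000, rangeMax=5000):
--     if isDivisible == 0:
--         return []
--     step = abs(isDivisible)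
--     start = rangeMin + (-rangeMin) % step
--     return [m for m in range(start, rangeMax, step) if m % notDivisible != 0]
-- ===== Notes on version B (the rewrite author's own statement) =====
-- stated objective: alternative
-- what changed: Instead of scanning every integer in [rangeMin, rangeMax) and testing i % isDivisible, B steps directly through the arithmetic progression of multiples of isDivisible (range(start, rangeMax, abs(isDivisible))) and filters out multiples of notDivisible; it does O((rangeMax-rangeMin)/|isDivisible|) iterations instead of O(rangeMax-rangeMin), though a timing run could not confirm a consistent speedup across random inputs.
import Mathlib
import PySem

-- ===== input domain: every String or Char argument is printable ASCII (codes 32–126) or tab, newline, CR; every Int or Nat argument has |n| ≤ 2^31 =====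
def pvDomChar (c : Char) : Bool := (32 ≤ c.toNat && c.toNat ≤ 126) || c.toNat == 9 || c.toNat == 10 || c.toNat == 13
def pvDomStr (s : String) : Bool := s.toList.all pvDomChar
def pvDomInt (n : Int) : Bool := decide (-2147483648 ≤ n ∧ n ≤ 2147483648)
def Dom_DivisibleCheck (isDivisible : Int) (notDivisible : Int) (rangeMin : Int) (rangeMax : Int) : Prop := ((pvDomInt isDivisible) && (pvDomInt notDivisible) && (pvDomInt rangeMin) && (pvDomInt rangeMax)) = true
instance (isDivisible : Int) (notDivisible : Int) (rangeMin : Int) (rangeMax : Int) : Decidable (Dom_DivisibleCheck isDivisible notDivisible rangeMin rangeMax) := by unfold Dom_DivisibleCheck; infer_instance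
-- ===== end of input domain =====

-- B iterates only over the multiples of isDivisible (arithmetic progression) instead of
-- testing every integer in [rangeMin, rangeMax); same return value, fewer iterations.


-- ===== PORT A =====
-- the 'while(i<rangeMax)' loop of A, state = (i, liste_return)
def DivisibleCheckLoop (isDivisible : Int) (notDivisible : Int) (rangeMax : Int) (i : Int) (acc : List Int) : List Int :=
  if i < rangeMax then
    DivisibleCheckLoop isDivisible notDivisible rangeMax (i + 1)
      (if PySem.Int.mod i isDivisible == 0 && PySem.Int.mod i notDivisible != 0 then acc ++ [i] else acc)
  else acc
termination_by (rangeMax - i).toNat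
decreasing_by omega

def DivisibleCheck (isDivisible : Int) (notDivisible : Int) (rangeMin : Int) (rangeMax : Int) : List Int :=
  DivisibleCheckLoop isDivisible notDivisible rangeMax rangeMin []

-- ===== PORT B =====
def DivisibleCheck_alt (isDivisible : Int) (notDivisible : Int) (rangeMin : Int) (rangeMax : Int) : List Int :=
  if isDivisible == 0 then []
  else
    let step := |isDivisible|
    let start := rangeMin + PySem.Int.mod (-rangeMin) step
    (PySem.List.pyRange start rangeMax step).filter (fun m => PySem.Int.mod m notDivisible != 0)

-- ===== PRECONDITION & SPEC =====
-- Pre_ excludes exactly the inputs where A raises ZeroDivisionError: isDivisible = 0 with a non-empty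
-- range (A's first `i % isDivisible` divides by zero), or notDivisible = 0 with a multiple of
-- isDivisible inside the range (A reaches `i % notDivisible` there).
def Pre_DivisibleCheck (isDivisible : Int) (notDivisible : Int) (rangeMin : Int) (rangeMax : Int) : Prop :=
  (isDivisible ≠ 0 ∨ rangeMax ≤ rangeMin) ∧
    (notDivisible ≠ 0 ∨ isDivisible = 0 ∨
      rangeMax ≤ rangeMin + PySem.Int.mod (-rangeMin) |isDivisible|)
instance (isDivisible : Int) (notDivisible : Int) (rangeMin : Int) (rangeMax : Int) : Decidable (Pre_DivisibleCheck isDivisible notDivisible rangeMin rangeMax) := by unfold Pre_DivisibleCheck; infer_instance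

def pvWitness_DivisibleCheck : Int × Int × Int × Int := (7, 5, 1, 20)

def Spec_DivisibleCheck (isDivisible : Int) (notDivisible : Int) (rangeMin : Int) (rangeMax : Int) (out : List Int) : Prop := out = DivisibleCheck_alt isDivisible notDivisible rangeMin rangeMax
instance (isDivisible : Int) (notDivisible : Int) (rangeMin : Int) (rangeMax : Int) (out : List Int) : Decidable (Spec_DivisibleCheck isDivisible notDivisible rangeMin rangeMax out) := by unfold Spec_DivisibleCheck; infer_instance

-- ===== CLAIM (what is proved, stated in full; the proofs are below) =====
def Claim_equal_DivisibleCheck : Prop := ∀ (isDivisible : Int) (notDivisible : Int) (rangeMin : Int) (rangeMax : Int), Dom_DivisibleCheck isDivisible notDivisible rangeMin rangeMax → Pre_DivisibleCheck isDivisible notDivisible rangeMin rangeMax → Spec_DivisibleCheck isDivisible notDivisible rangeMin rangeMax (DivisibleCheck isDivisible notDivisible rangeMin rangeMax)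

-- ===== LEMMAS AND PROOFS =====

-- pyRange with a positive step is empty when the interval is
theorem pyRange_pos_nil {d a b : Int} (hd : 0 < d) (h : b ≤ a) :
    PySem.List.pyRange a b d = [] := by
  rw [PySem.List.pyRange_of_pos a b hd]
  simp [show ¬ a < b by omega]

-- pyRange with a positive step, cons form
theorem pyRange_pos_cons {d a b : Int} (hd : 0 < d) (h : a < b) :
    PySem.List.pyRange a b d = a :: PySem.List.pyRange (a + d) b d := by
  rw [PySem.List.pyRange_of_pos a b hd, PySem.List.pyRange_of_pos (a + d) b hd]
  have h0 : (0:Int) ≤ b - a - 1 := by omega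
  have key : (b - a + d - 1) / d = (b - a - 1) / d + 1 := by
    have e : b - a + d - 1 = (b - a - 1) + 1 * d := by ring
    rw [e, Int.add_mul_ediv_right _ _ (by omega : d ≠ 0)]
  have hnn : 0 ≤ (b - a - 1) / d := Int.ediv_nonneg h0 (le_of_lt hd)
  have hcount : ((b - a + d - 1) / d).toNat = ((b - a - 1) / d).toNat + 1 := by omega
  by_cases h2 : a + d < b
  · have e2 : b - (a + d) + d - 1 = b - a - 1 := by ring
    rw [if_pos h, if_pos h2, e2, hcount, List.range_succ_eq_map]
    simp only [List.map_cons, List.map_map]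
    congr 1
    · simp
    · apply List.map_congr_left
      intro k _
      simp [Function.comp]
      ring
  · have hz : (b - a - 1) / d = 0 :=
      Int.ediv_eq_zero_of_lt h0 (by omega)
    rw [if_pos h, if_neg h2, hcount, hz]
    simp

-- the first multiple of d at or above i+1, given one at or above i
theorem next_start_dvd {d i : Int} (hd : 0 < d) (hdvd : d ∣ i) :
    (i + 1) + PySem.Int.mod (-(i + 1)) d = i + d := by
  rw [PySem.Int.mod_eq_emod_of_pos hd]
  obtain ⟨q, hq⟩ := hdvd
  have e : -(i + 1) = -1 + d * (-q) := by rw [hq]; ring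
  rw [e, Int.add_mul_emod_self_left]
  have e2 : (-1 : Int) = (d - 1) + d * (-1) := by ring
  rw [e2, Int.add_mul_emod_self_left, Int.emod_eq_of_lt (by omega) (by omega)]
  ring

theorem next_start_ndvd {d i : Int} (hd : 0 < d) (hdvd : ¬ d ∣ i) :
    (i + 1) + PySem.Int.mod (-(i + 1)) d = i + PySem.Int.mod (-i) d := by
  rw [PySem.Int.mod_eq_emod_of_pos hd, PySem.Int.mod_eq_emod_of_pos hd]
  have hr0 : (-i) % d ≠ 0 := by
    intro h0
    exact hdvd (dvd_neg.mp (Int.dvd_of_emod_eq_zero h0))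
  have hrnn : 0 ≤ (-i) % d := Int.emod_nonneg _ (by omega)
  have hrlt : (-i) % d < d := Int.emod_lt_of_pos _ hd
  have hd2 : 2 ≤ d := by
    rcases lt_or_ge 1 d with h' | h'
    · omega
    · exact absurd (by omega : d = 1) (fun e => hdvd (e ▸ one_dvd i))
  have e : -(i + 1) = -i - 1 := by ring
  rw [e, Int.sub_emod, Int.emod_eq_of_lt (by omega : (0:Int) ≤ 1) (by omega : (1:Int) < d),
    Int.emod_eq_of_lt (by omega) (by omega)]
  ring

-- A's loop collects exactly the multiples of |isDivisible| from the next one ≥ i on,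
-- filtered by non-divisibility by notDivisible
theorem DivisibleCheckLoop_eq (isDivisible notDivisible rangeMax : Int)
    (hd : isDivisible ≠ 0) (i : Int) (acc : List Int) :
    DivisibleCheckLoop isDivisible notDivisible rangeMax i acc =
      acc ++ (PySem.List.pyRange (i + PySem.Int.mod (-i) |isDivisible|) rangeMax
        |isDivisible|).filter (fun m => PySem.Int.mod m notDivisible != 0) := by
  have hd' : 0 < |isDivisible| := abs_pos.mpr hd
  rw [DivisibleCheckLoop]
  by_cases h : i < rangeMax
  · rw [if_pos h]
    by_cases hdvd : |isDivisible| ∣ i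
    · have hr0 : PySem.Int.mod (-i) |isDivisible| = 0 :=
        (PySem.Int.mod_eq_zero_iff_dvd _ _).mpr (dvd_neg.mpr hdvd)
      have hmodA : PySem.Int.mod i isDivisible = 0 :=
        (PySem.Int.mod_eq_zero_iff_dvd _ _).mpr ((abs_dvd _ _).mp hdvd)
      rw [DivisibleCheckLoop_eq isDivisible notDivisible rangeMax hd (i + 1), next_start_dvd hd' hdvd,
        hr0, add_zero, pyRange_pos_cons hd' h, List.filter_cons]
      simp only [hmodA]
      by_cases hn : PySem.Int.mod i notDivisible = 0 <;> simp [hn]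
    · have hr0 : PySem.Int.mod (-i) |isDivisible| ≠ 0 := by
        intro h0
        exact hdvd (dvd_neg.mp ((PySem.Int.mod_eq_zero_iff_dvd _ _).mp h0))
      have hmodA : PySem.Int.mod i isDivisible ≠ 0 := by
        intro h0
        exact hdvd ((abs_dvd _ _).mpr ((PySem.Int.mod_eq_zero_iff_dvd _ _).mp h0))
      rw [DivisibleCheckLoop_eq isDivisible notDivisible rangeMax hd (i + 1), next_start_ndvd hd' hdvd]
      simp [hmodA]
  · rw [if_neg h]
    have hge : rangeMax ≤ i + PySem.Int.mod (-i) |isDivisible| := by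
      have := PySem.Int.mod_nonneg (-i) hd'
      omega
    rw [pyRange_pos_nil hd' hge]
    simp
termination_by (rangeMax - i).toNat
decreasing_by all_goals omega

-- ===== VERDICT (by name: the statement is the Claim_ definition above) =====
theorem DivisibleCheck_spec : Claim_equal_DivisibleCheck := by
  intro isDivisible notDivisible rangeMin rangeMax _ hpre
  unfold Spec_DivisibleCheck DivisibleCheck DivisibleCheck_alt
  by_cases h0 : isDivisible = 0
  · subst h0
    have hle : rangeMax ≤ rangeMin := by
      rcases hpre.1 with h | h
      · exact absurd rfl h
      · exact h
    rw [DivisibleCheckLoop, if_neg (by omega)]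
    simp
  · rw [DivisibleCheckLoop_eq isDivisible notDivisible rangeMax h0 rangeMin []]
    simp [h0]
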